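-- pv_equiv track=rewrite | github.com/AshleighWong/UpTeach | backend/newapitest.py | _generate_discussion_questions
-- ===== SOURCE A (Python) =====
-- from typing import List, Dict, Optional
--
-- def _generate_discussion_questions(news: List[Dict]) -> List[str]:
--     """
--     Generate thought-provoking discussion questions.
--     """
--     questions = []
--     for article in news:
--         questions.extend(
--             [
--                 f"How does {article['title']} relate to what we've learned?",
--                 "What are the potential long-term implications?",
--                 "How might different stakeholders view this development?",
--                 "What are the ethical considerations involved?",
--                 "How does this connect to other current events?",
--             ]
--         )
--     return questions[:5]  # Return top 5 questions
-- ===== SOURCE B (Python) =====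
-- from typing import List, Dict, Optional
--
-- def _generate_discussion_questions(news: List[Dict]) -> List[str]:
--     """Generate thought-provoking discussion questions (first 5 only)."""
--     if not news:
--         return []
--     article = news[0]
--     return [
--         f"How does {article['title']} relate to what we've learned?",
--         "What are the potential long-term implications?",
--         "How might different stakeholders view this development?",
--         "What are the ethical considerations involved?",
--         "How does this connect to other current events?",
--     ]
-- ===== Notes on version B (the rewrite author's own statement) =====
-- stated objective: simpler
-- what changed: Dropped the accumulate-over-all-articles loop and the [:5] slice: since each article contributes exactly 5 questions and only the first 5 are returned, B reads only news[0] and returns the literal 5-element list (or [] for empty input).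
import Mathlib
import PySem

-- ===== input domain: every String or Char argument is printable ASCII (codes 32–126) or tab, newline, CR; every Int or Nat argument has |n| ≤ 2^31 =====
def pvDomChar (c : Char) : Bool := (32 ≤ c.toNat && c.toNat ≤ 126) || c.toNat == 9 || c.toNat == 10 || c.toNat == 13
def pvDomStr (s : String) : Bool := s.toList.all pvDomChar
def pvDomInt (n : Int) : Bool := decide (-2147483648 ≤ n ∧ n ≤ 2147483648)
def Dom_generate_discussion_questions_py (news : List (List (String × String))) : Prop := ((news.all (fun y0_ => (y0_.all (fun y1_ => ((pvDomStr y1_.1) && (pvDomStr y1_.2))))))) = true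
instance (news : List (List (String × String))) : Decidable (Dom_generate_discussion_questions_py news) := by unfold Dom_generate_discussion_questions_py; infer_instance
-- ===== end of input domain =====

-- B drops A's accumulate-then-slice loop: only news[0] ever contributes to the first 5 questions,
-- so B returns the literal 5-question list for news[0] (or [] when news is empty); return value only.


-- ===== PORT A =====
-- article['title'] raises KeyError when absent; inside Pre_ every lookup succeeds, so getD "" is exact there
def pvQuestionsOf (article : List (String × String)) : List String :=
  ["How does " ++ PySem.Dict.getD (PySem.Dict.mk article) "title" "" ++ " relate to what we've learned?",
   "What are the potential long-term implications?",
   "How might different stakeholders view this development?",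
   "What are the ethical considerations involved?",
   "How does this connect to other current events?"]

def generate_discussion_questions_py (news : List (List (String × String))) : List String :=
  (news.foldl (fun questions article => questions ++ pvQuestionsOf article) []).take 5

-- ===== PORT B =====
def generate_discussion_questions_py_alt (news : List (List (String × String))) : List String :=
  match news with
  | [] => []
  | article :: _ =>
    ["How does " ++ PySem.Dict.getD (PySem.Dict.mk article) "title" "" ++ " relate to what we've learned?",
     "What are the potential long-term implications?",
     "How might different stakeholders view this development?",
     "What are the ethical considerations involved?",
     "How does this connect to other current events?"]

-- ===== PRECONDITION & SPEC =====
-- Pre_ excludes exactly the inputs where Python A raises KeyError: some article lacking the 'title' key.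
def Pre_generate_discussion_questions_py (news : List (List (String × String))) : Prop :=
  ∀ article ∈ news, (PySem.Dict.get? (PySem.Dict.mk article) "title").isSome
instance (news : List (List (String × String))) : Decidable (Pre_generate_discussion_questions_py news) := by unfold Pre_generate_discussion_questions_py; infer_instance
def pvWitness_generate_discussion_questions_py : (List (List (String × String))) := [[("title", "AI")]]

def Spec_generate_discussion_questions_py (news : List (List (String × String))) (out : List String) : Prop := out = generate_discussion_questions_py_alt news
instance (news : List (List (String × String))) (out : List String) : Decidable (Spec_generate_discussion_questions_py news out) := by unfold Spec_generate_discussion_questions_py; infer_instance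

-- ===== CLAIM (what is proved, stated in full; the proofs are below) =====
def Claim_equal_generate_discussion_questions_py : Prop := ∀ (news : List (List (String × String))), Dom_generate_discussion_questions_py news → Pre_generate_discussion_questions_py news → Spec_generate_discussion_questions_py news (generate_discussion_questions_py news)

-- ===== LEMMAS AND PROOFS =====

-- ===== VERDICT (by name: the statement is the Claim_ definition above) =====
theorem generate_discussion_questions_py_spec : Claim_equal_generate_discussion_questions_py := by
  intro news _ _
  unfold Spec_generate_discussion_questions_py generate_discussion_questions_py generate_discussion_questions_py_alt
  rw [PySem.List.foldl_append_eq_flatMap]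
  cases news with
  | nil => rfl
  | cons a rest => simp [pvQuestionsOf, List.take]
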